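-- pv_equiv track=rewrite | github.com/ASHBORN-coder/MondaySproject | src/schema_manager.py | identify_required_columns
-- ===== SOURCE A (Python) =====
-- from typing import Dict, List, Tuple, Optional
--
-- def identify_required_columns(query: str, schema_info: Dict) -> List[str]:
--     """
--     Analyze query to determine which columns are needed
--
--     Args:
--         query: User's natural language query
--         schema_info: Schema information from fetch_board_schema
--
--     Returns:
--         List of column names required for the query
--     """
--     query_lower = query.lower()
--     available_columns = schema_info['columns']
--     required_columns = []
--
--     # Always include item name
--     if 'Item Name' in available_columns:
--         required_columns.append('Item Name')
--
--     # Revenue/Money related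
--     if any(word in query_lower for word in ['revenue', 'money', 'amount', 'value', 'collected', 'billed', 'price', 'total']):
--         money_cols = [col for col in available_columns if any(
--             keyword in col.lower() for keyword in ['amount', 'value', 'price', 'revenue', 'collected', 'billed', 'deal value']
--         )]
--         required_columns.extend(money_cols)
--
--     # Sector/Category related
--     if any(word in query_lower for word in ['sector', 'category', 'industry', 'service']):
--         sector_cols = [col for col in available_columns if any(
--             keyword in col.lower() for keyword in ['sector', 'service', 'category', 'industry']
--         )]
--         required_columns.extend(sector_cols)
--
--     # Status related - CRITICAL for deal queries
--     if any(word in query_lower for word in ['status', 'stage', 'open', 'closed', 'won', 'lost', 'deal', 'pipeline', 'how many']):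
--         status_cols = [col for col in available_columns if any(
--             keyword in col.lower() for keyword in ['status', 'stage', 'state', 'deal status']
--         )]
--         required_columns.extend(status_cols)
--
--     # Date related
--     if any(word in query_lower for word in ['date', 'when', 'time', 'quarter', 'month', 'year', 'period']):
--         date_cols = [col for col in available_columns if any(
--             keyword in col.lower() for keyword in ['date', 'time', 'created', 'updated', 'close']
--         )]
--         required_columns.extend(date_cols)
--
--     # Quantity related
--     if any(word in query_lower for word in ['quantity', 'count', 'number', 'how many']):
--         qty_cols = [col for col in available_columns if any(
--             keyword in col.lower() for keyword in ['quantity', 'count', 'number', 'qty']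
--         )]
--         required_columns.extend(qty_cols)
--
--     # Owner/Client related
--     if any(word in query_lower for word in ['owner', 'client', 'who', 'person']):
--         owner_cols = [col for col in available_columns if any(
--             keyword in col.lower() for keyword in ['owner', 'client', 'person', 'code']
--         )]
--         required_columns.extend(owner_cols)
--
--     # Remove duplicates while preserving order
--     required_columns = list(dict.fromkeys(required_columns))
--
--     # IMPORTANT: If very few columns identified, be conservative and fetch more
--     # This prevents missing critical columns
--     if len(required_columns) <= 2:  # Only Item Name + 1 other column or less
--         # Return all columns to be safe
--         return available_columns
--
--     # If we have 3-5 columns, add common analysis columns as safety net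
--     if len(required_columns) <= 5:
--         # Add status columns if not already included (critical for most queries)
--         for col in available_columns:
--             if 'status' in col.lower() and col not in required_columns:
--                 required_columns.append(col)
--         # Add date columns for time-based analysis
--         for col in available_columns:
--             if 'date' in col.lower() and col not in required_columns:
--                 required_columns.append(col)
--
--     return required_columns
-- ===== SOURCE B (Python) =====
-- # Column-centric reimplementation: instead of A's six rule-major filter passes
-- # plus a final dedup, classify each distinct column ONCE by the first fired rule
-- # that matches it (a rank), then emit the rank classes in order; the fallback
-- # extras are collected in one combined pass instead of two.
-- _RULES = [
--     (('revenue', 'money', 'amount', 'value', 'collected', 'billed', 'price', 'total'),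
--      ('amount', 'value', 'price', 'revenue', 'collected', 'billed', 'deal value')),
--     (('sector', 'category', 'industry', 'service'),
--      ('sector', 'service', 'category', 'industry')),
--     (('status', 'stage', 'open', 'closed', 'won', 'lost', 'deal', 'pipeline', 'how many'),
--      ('status', 'stage', 'state', 'deal status')),
--     (('date', 'when', 'time', 'quarter', 'month', 'year', 'period'),
--      ('date', 'time', 'created', 'updated', 'close')),
--     (('quantity', 'count', 'number', 'how many'),
--      ('quantity', 'count', 'number', 'qty')),
--     (('owner', 'client', 'who', 'person'),
--      ('owner', 'client', 'person', 'code')),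
-- ]
--
--
-- def identify_required_columns(query: str, schema_info) -> list:
--     query_lower = query.lower()
--     available_columns = schema_info['columns']
--
--     # rules whose trigger words appear in the query, with their rank (1-based)
--     fired = [(i + 1, kws) for i, (tws, kws) in enumerate(_RULES)
--              if any(w in query_lower for w in tws)]
--
--     def rank(col):
--         if col == 'Item Name':
--             return 0
--         cl = col.lower()
--         for r, kws in fired:
--             if any(kw in cl for kw in kws):
--                 return r
--         return None
--
--     distinct = list(dict.fromkeys(available_columns))
--     ranked = [(rank(c), c) for c in distinct]
--     required = [c for target in range(len(_RULES) + 1)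
--                 for r, c in ranked if r == target]
--
--     if len(required) <= 2:
--         return available_columns
--     if len(required) <= 5:
--         extras = ([], [])  # (status columns, date columns), one combined pass
--         for c in available_columns:
--             if c in required or c in extras[0] or c in extras[1]:
--                 continue
--             cl = c.lower()
--             if 'status' in cl:
--                 extras[0].append(c)
--             elif 'date' in cl:
--                 extras[1].append(c)
--         required += extras[0] + extras[1]
--     return required
-- ===== Notes on version B (the rewrite author's own statement) =====
-- stated objective: alternative
-- what changed: B inverts the traversal: instead of six rule-major filter passes over the columns concatenated and then deduplicated, it classifies each distinct column once by the rank of the first fired rule matching it and emits the rank classes in order, and it collects the <=5-fallback status/date extras in one combined pass instead of two.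
import Mathlib
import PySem

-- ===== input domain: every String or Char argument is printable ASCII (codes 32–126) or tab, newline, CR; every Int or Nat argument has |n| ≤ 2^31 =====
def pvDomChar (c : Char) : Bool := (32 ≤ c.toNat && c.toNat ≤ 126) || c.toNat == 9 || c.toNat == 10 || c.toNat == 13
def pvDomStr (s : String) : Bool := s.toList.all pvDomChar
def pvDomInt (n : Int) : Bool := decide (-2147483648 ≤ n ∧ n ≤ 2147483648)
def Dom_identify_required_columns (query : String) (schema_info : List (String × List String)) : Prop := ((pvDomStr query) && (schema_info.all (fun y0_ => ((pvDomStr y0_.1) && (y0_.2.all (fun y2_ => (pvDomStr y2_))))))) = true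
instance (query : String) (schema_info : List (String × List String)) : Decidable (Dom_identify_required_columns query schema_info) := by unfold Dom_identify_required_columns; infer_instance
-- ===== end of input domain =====

-- B classifies each distinct column once by the first fired rule matching it (a rank) and
-- emits the rank classes in order, instead of A's six rule-major filter passes + dedup.
-- Both A and B raise KeyError when schema_info has no 'columns' key: Pre_ excludes that.

-- ===== PORT A =====
-- helper: any(word in query_lower for word in words)
def aAnyWord (query_lower : String) (words : List String) : Bool :=
  words.any (fun w => PySem.Str.isIn w query_lower)

-- helper: [col for col in cols if any(kw in col.lower() for kw in kws)]
def aMatchCols (cols : List String) (kws : List String) : List String :=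
  cols.filter (fun col => kws.any (fun kw => PySem.Str.isIn kw (PySem.Str.lower col)))

def identify_required_columns (query : String) (schema_info : List (String × List String)) : List String :=
  match (PySem.Dict.mk schema_info).get? "columns" with
  | none => []   -- Python raises KeyError here; excluded by Pre_
  | some available_columns =>
    let query_lower := PySem.Str.lower query
    let r0 : List String := if available_columns.contains "Item Name" then ["Item Name"] else []
    let r1 := if aAnyWord query_lower ["revenue", "money", "amount", "value", "collected", "billed", "price", "total"]
              then r0 ++ aMatchCols available_columns ["amount", "value", "price", "revenue", "collected", "billed", "deal value"] else r0
    let r2 := if aAnyWord query_lower ["sector", "category", "industry", "service"]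
              then r1 ++ aMatchCols available_columns ["sector", "service", "category", "industry"] else r1
    let r3 := if aAnyWord query_lower ["status", "stage", "open", "closed", "won", "lost", "deal", "pipeline", "how many"]
              then r2 ++ aMatchCols available_columns ["status", "stage", "state", "deal status"] else r2
    let r4 := if aAnyWord query_lower ["date", "when", "time", "quarter", "month", "year", "period"]
              then r3 ++ aMatchCols available_columns ["date", "time", "created", "updated", "close"] else r3
    let r5 := if aAnyWord query_lower ["quantity", "count", "number", "how many"]
              then r4 ++ aMatchCols available_columns ["quantity", "count", "number", "qty"] else r4
    let r6 := if aAnyWord query_lower ["owner", "client", "who", "person"]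
              then r5 ++ aMatchCols available_columns ["owner", "client", "person", "code"] else r5
    let required := PySem.List.dedup r6
    if required.length ≤ 2 then available_columns
    else if required.length ≤ 5 then
      let s1 := available_columns.foldl (fun acc col =>
        if PySem.Str.isIn "status" (PySem.Str.lower col) && !(acc.contains col) then acc ++ [col] else acc) required
      available_columns.foldl (fun acc col =>
        if PySem.Str.isIn "date" (PySem.Str.lower col) && !(acc.contains col) then acc ++ [col] else acc) s1
    else required

-- ===== PORT B =====
-- the rules table: (trigger words, column keywords), original order
def bRules : List (List String × List String) :=
  [ (["revenue", "money", "amount", "value", "collected", "billed", "price", "total"],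
     ["amount", "value", "price", "revenue", "collected", "billed", "deal value"]),
    (["sector", "category", "industry", "service"],
     ["sector", "service", "category", "industry"]),
    (["status", "stage", "open", "closed", "won", "lost", "deal", "pipeline", "how many"],
     ["status", "stage", "state", "deal status"]),
    (["date", "when", "time", "quarter", "month", "year", "period"],
     ["date", "time", "created", "updated", "close"]),
    (["quantity", "count", "number", "how many"],
     ["quantity", "count", "number", "qty"]) ,
    (["owner", "client", "who", "person"],
     ["owner", "client", "person", "code"]) ]

-- def rank(col): first fired rule matching col (0 = the 'Item Name' seed)
def bRank (fired : List (Int × List String)) (col : String) : Option Int :=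
  if col == "Item Name" then some 0
  else
    let cl := PySem.Str.lower col
    ((fired.find? (fun rk => rk.2.any (fun kw => PySem.Str.isIn kw cl))).map (fun rk => rk.1))

def identify_required_columns_alt (query : String) (schema_info : List (String × List String)) : List String :=
  match (PySem.Dict.mk schema_info).get? "columns" with
  | none => []   -- Python raises KeyError here; excluded by Pre_
  | some available_columns =>
    let query_lower := PySem.Str.lower query
    let fired := ((PySem.List.enumerate bRules).filter
        (fun it => it.2.1.any (fun w => PySem.Str.isIn w query_lower))).map
        (fun it => (it.1 + 1, it.2.2))
    let distinct := PySem.List.dedup available_columns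
    let ranked := distinct.map (fun c => (bRank fired c, c))
    let required := (PySem.List.pyRange 0 ((bRules.length : Int) + 1) 1).flatMap
        (fun target => (ranked.filter (fun rc => rc.1 == some target)).map (fun rc => rc.2))
    if required.length ≤ 2 then available_columns
    else if required.length ≤ 5 then
      let extras := available_columns.foldl (fun (ex : List String × List String) c =>
        if required.contains c || ex.1.contains c || ex.2.contains c then ex
        else
          let cl := PySem.Str.lower c
          if PySem.Str.isIn "status" cl then (ex.1 ++ [c], ex.2)
          else if PySem.Str.isIn "date" cl then (ex.1, ex.2 ++ [c])
          else ex) ([], [])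
      required ++ extras.1 ++ extras.2
    else required

-- ===== PRECONDITION & SPEC =====
-- Pre_ excludes exactly the inputs where schema_info has no 'columns' key, on which A (and B) raise KeyError.
def Pre_identify_required_columns (query : String) (schema_info : List (String × List String)) : Prop :=
  "columns" ∈ schema_info.map Prod.fst
instance (query : String) (schema_info : List (String × List String)) : Decidable (Pre_identify_required_columns query schema_info) := by unfold Pre_identify_required_columns; infer_instance

def pvWitness_identify_required_columns : String × (List (String × List String)) :=
  ("how many deals closed", [("columns", ["Item Name", "Deal Value", "Status", "Close Date"])])

def Spec_identify_required_columns (query : String) (schema_info : List (String × List String)) (out : List String) : Prop := out = identify_required_columns_alt query schema_info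
instance (query : String) (schema_info : List (String × List String)) (out : List String) : Decidable (Spec_identify_required_columns query schema_info out) := by unfold Spec_identify_required_columns; infer_instance

-- ===== CLAIM (what is proved, stated in full; the proofs are below) =====
def Claim_equal_identify_required_columns : Prop := ∀ (query : String) (schema_info : List (String × List String)), Dom_identify_required_columns query schema_info → Pre_identify_required_columns query schema_info → Spec_identify_required_columns query schema_info (identify_required_columns query schema_info)

-- ===== LEMMAS AND PROOFS =====

-- structural form of Python's dict.fromkeys dedup, convenient for induction
def dd : List String → List String
  | [] => []
  | x :: xs => x :: (dd xs).filter (fun c => !(c == x))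

lemma foldl_add_eq_dd (xs : List String) : ∀ (s : List String),
    xs.foldl PySem.Set.add s = s ++ (dd xs).filter (fun c => !s.contains c) := by
  induction xs with
  | nil => intro s; simp [dd]
  | cons x xs ih =>
    intro s
    simp only [List.foldl_cons, dd]
    rw [ih (PySem.Set.add s x)]
    simp only [PySem.Set.add, PySem.Set.contains]
    by_cases hx : x ∈ s
    · simp only [List.contains_eq_mem, hx, decide_true, if_true, List.filter_cons,
        Bool.not_true, List.filter_filter]
      congr 2
      funext c
      by_cases hc : c = x
      · subst hc; simp [hx]
      · simp [hc]
    · simp only [List.contains_eq_mem, hx, decide_false, Bool.false_eq_true, if_false,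
        List.filter_cons, Bool.not_false, List.append_assoc, List.singleton_append,
        List.filter_filter]
      congr 3
      funext c
      by_cases hc : c = x
      · subst hc; simp [hx]
      · simp [hc]

lemma dedup_eq_dd (xs : List String) : PySem.List.dedup xs = dd xs := by
  rw [PySem.List.dedup_eq_ofList, PySem.Set.ofList_eq_foldl, foldl_add_eq_dd]
  simp

lemma dd_append (xs ys : List String) :
    dd (xs ++ ys) = dd xs ++ (dd ys).filter (fun c => !xs.contains c) := by
  induction xs with
  | nil => simp [dd]
  | cons x xs ih =>
    simp only [List.cons_append, dd, ih, List.filter_append, List.filter_filter]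
    congr 3
    funext c
    by_cases hc : c = x
    · subst hc; simp
    · simp [hc, List.contains_eq_mem, Bool.and_comm]

lemma dd_filter (p : String → Bool) (xs : List String) :
    dd (xs.filter p) = (dd xs).filter p := by
  induction xs with
  | nil => simp [dd]
  | cons x xs ih =>
    by_cases hp : p x
    · simp only [List.filter_cons, hp, if_true, dd, ih, List.filter_filter]
      congr 2
      funext c
      exact Bool.and_comm _ _
    · simp only [List.filter_cons, hp, Bool.false_eq_true, if_false, dd, ih, List.filter_filter]
      congr 1
      funext c
      by_cases hc : c = x
      · subst hc; simp [hp]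
      · simp [hc]

-- the central inversion: dedup of the rule-major concatenation of filters
-- equals the rank classes (first matching predicate) emitted in order
lemma dd_flatten_classes (ps : List (String → Bool)) (xs : List String) :
    dd ((ps.map (fun p => xs.filter p)).flatten)
      = (List.range ps.length).flatMap
          (fun i => (dd xs).filter (fun c => ps.findIdx? (fun p => p c) == some i)) := by
  induction ps with
  | nil => simp [dd]
  | cons p qs ih =>
    simp only [List.map_cons, List.flatten_cons, List.length_cons]
    rw [dd_append, dd_filter, ih]
    rw [List.range_succ_eq_map]
    simp only [List.flatMap_cons, List.flatMap_map, List.filter_flatMap]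
    congr 1
    · -- head class
      congr 1
      funext c
      simp only [List.findIdx?_cons]
      by_cases hp : p c
      · simp [hp]
      · simp only [hp, Bool.false_eq_true, if_false]
        cases h : List.findIdx? (fun p => p c) qs <;> simp
    · -- tail classes
      apply List.flatMap_congr
      intro i _
      rw [List.filter_filter]
      apply List.filter_congr
      intro c hc
      have hcx : c ∈ xs := by
        rw [← PySem.List.mem_dedup (x := c) (xs := xs), dedup_eq_dd]; exact hc
      have hfp : (List.filter p xs).contains c = p c := by
        simp only [List.contains_eq_mem, List.mem_filter]
        cases h : p c <;> simp [hcx, h]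
      simp only [List.findIdx?_cons, hfp]
      by_cases hp : p c
      · simp [hp]
      · simp only [hp, Bool.false_eq_true, if_false, Bool.not_false, Bool.and_true]
        cases h : List.findIdx? (fun p => p c) qs <;> simp

-- B's for-loop over the fired rules, as a findIdx? over the full rules list
lemma fired_find_eq (T : List String → Bool) (M : List String → Bool) :
    ∀ (rs : List (List String × List String)) (s : Int),
      ((((PySem.List.enumerate rs s).filter (fun it => T it.2.1)).map
          (fun it => (it.1 + 1, it.2.2))).find? (fun rk => M rk.2)).map (fun rk => rk.1)
        = (rs.findIdx? (fun r => T r.1 && M r.2)).map (fun n => (n : Int) + s + 1) := by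
  intro rs
  induction rs with
  | nil => intro s; simp [PySem.List.enumerate_nil]
  | cons r rs ih =>
    intro s
    rw [PySem.List.enumerate_cons]
    simp only [List.filter_cons, List.findIdx?_cons]
    by_cases hT : T r.1
    · simp only [hT, if_true, List.map_cons, List.find?_cons, Bool.true_and]
      by_cases hM : M r.2
      · simp [hM]
      · simp only [hM, Bool.false_eq_true, if_false]
        rw [ih (s + 1)]
        cases h : List.findIdx? (fun r => T r.1 && M r.2) rs <;> simp
        omega
    · simp only [hT, Bool.false_eq_true, if_false, Bool.false_and]
      rw [ih (s + 1)]
      cases h : List.findIdx? (fun r => T r.1 && M r.2) rs <;> simp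
      omega

-- the seven classification predicates: the 'Item Name' seed, then one per rule
def psFull (ql : String) : List (String → Bool) :=
  (fun c => c == "Item Name") ::
    bRules.map (fun r => fun c =>
      aAnyWord ql r.1 && r.2.any (fun kw => PySem.Str.isIn kw (PySem.Str.lower c)))

-- B's rank function is the index of the first matching classification predicate
lemma bRank_eq (ql c : String) :
    bRank (((PySem.List.enumerate bRules).filter
        (fun it => it.2.1.any (fun w => PySem.Str.isIn w ql))).map
        (fun it => (it.1 + 1, it.2.2))) c
      = ((psFull ql).findIdx? (fun p => p c)).map (fun n => (n : Int)) := by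
  unfold bRank psFull
  by_cases hIN : c == "Item Name"
  · simp [List.findIdx?_cons, hIN]
  · simp only [hIN, Bool.false_eq_true, if_false, List.findIdx?_cons]
    rw [fired_find_eq (fun tws => tws.any (fun w => PySem.Str.isIn w ql))
        (fun kws => kws.any (fun kw => PySem.Str.isIn kw (PySem.Str.lower c))) bRules 0]
    rw [List.findIdx?_map]
    simp only [Function.comp_def, aAnyWord]
    cases h : List.findIdx?
        (fun r : List String × List String =>
          (r.1.any fun w => PySem.Str.isIn w ql) &&
            r.2.any fun kw => PySem.Str.isIn kw (PySem.Str.lower c)) bRules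
    · simp
    · simp

-- one classification branch of A, as an unconditionally appended filter
lemma segA (b : Bool) (acc cols kws : List String) :
    (if b then acc ++ aMatchCols cols kws else acc)
      = acc ++ cols.filter (fun c => b && kws.any (fun kw => PySem.Str.isIn kw (PySem.Str.lower c))) := by
  cases b <;> simp [aMatchCols]

lemma nodup_filter_beq (a : String) : ∀ (l : List String), l.Nodup →
    l.filter (fun c => c == a) = if a ∈ l then [a] else [] := by
  intro l
  induction l with
  | nil => simp
  | cons x l ih =>
    intro hnd
    rw [List.nodup_cons] at hnd
    rw [List.filter_cons]
    by_cases hx : x = a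
    · subst hx
      simp only [BEq.rfl, if_true, List.mem_cons, true_or, if_pos]
      have hnil : l.filter (fun c => c == x) = [] := by
        apply List.filter_eq_nil_iff.mpr
        intro c hc
        simp only [beq_iff_eq]
        intro hcx; subst hcx; exact hnd.1 hc
      rw [hnil]
    · have hxa : (x == a) = false := by simp [hx]
      rw [hxa]
      simp only [Bool.false_eq_true, if_false]
      rw [ih hnd.2]
      have hmem : (a ∈ x :: l) ↔ (a ∈ l) := by
        constructor
        · intro h
          rcases List.mem_cons.mp h with h1 | h2
          · exact absurd h1.symm hx
          · exact h2
        · intro h; exact List.mem_cons_of_mem _ h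
      simp only [hmem]

lemma nodup_dd (xs : List String) : (dd xs).Nodup := by
  rw [← dedup_eq_dd]; exact PySem.List.nodup_dedup xs

lemma mem_dd (c : String) (xs : List String) : c ∈ dd xs ↔ c ∈ xs := by
  rw [← dedup_eq_dd]; exact PySem.List.mem_dedup xs c

-- A's 'Item Name' seed behaves like the filter by the seed predicate
lemma seedNorm (xs ys : List String) :
    dd ((if xs.contains "Item Name" then ["Item Name"] else []) ++ ys)
      = dd (xs.filter (fun c => c == "Item Name") ++ ys) := by
  rw [dd_append, dd_append, dd_filter, nodup_filter_beq _ _ (nodup_dd xs)]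
  simp only [mem_dd, List.contains_eq_mem]
  by_cases h : "Item Name" ∈ xs
  · simp only [h, decide_true, if_true]
    have hdd : dd ["Item Name"] = ["Item Name"] := by simp [dd]
    rw [hdd]
    congr 2
    funext c
    by_cases hc : c = "Item Name"
    · subst hc; simp [h]
    · simp [hc]
  · simp only [h, decide_false, Bool.false_eq_true, if_false]
    have hdd : dd ([] : List String) = [] := by simp [dd]
    rw [hdd]
    simp only [List.nil_append]
    congr 1
    funext c
    by_cases hc : c = "Item Name"
    · subst hc; simp [h]
    · simp [hc]

-- the append-if-unseen loop, characterised as a filtered dedup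
lemma fold_if_append (P : String → Bool) :
    ∀ (xs E : List String),
      xs.foldl (fun acc c => if P c && !acc.contains c then acc ++ [c] else acc) E
        = E ++ (dd xs).filter (fun c => P c && !E.contains c) := by
  intro xs
  induction xs with
  | nil => intro E; simp [dd]
  | cons c cs ih =>
    intro E
    simp only [List.foldl_cons, dd, List.filter_cons]
    by_cases hp : P c
    · by_cases hc : c ∈ E
      · have : (P c && !E.contains c) = false := by simp [hp, hc, List.contains_eq_mem]
        rw [this]
        simp only [Bool.false_eq_true, if_false, ih E, List.filter_filter]
        congr 2
        funext d
        by_cases hd : d = c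
        · subst hd; simp [hc, List.contains_eq_mem]
        · simp [hd]
      · have hcond : (P c && !E.contains c) = true := by simp [hp, hc, List.contains_eq_mem]
        rw [hcond, if_pos rfl, ih (E ++ [c])]
        simp only [List.filter_filter, List.append_assoc, List.singleton_append]
        congr 3
        funext d
        by_cases hd : d = c
        · subst hd; simp [List.contains_eq_mem]
        · simp [hd, List.contains_eq_mem]
    · have : (P c && !E.contains c) = false := by simp [hp]
      rw [this]
      simp only [Bool.false_eq_true, if_false, ih E, List.filter_filter]
      congr 2
      funext d
      by_cases hd : d = c
      · subst hd; simp [hp]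
      · simp [hd]

-- B's combined status/date pass splits into two independent append-if-unseen loops
lemma pair_fold_eq (S Dt : String → Bool) (R : List String) :
    ∀ (xs : List String) (E1 E2 : List String),
      (∀ c ∈ E1, S c = true ∧ c ∉ R) →
      (∀ c ∈ E2, S c = false ∧ c ∉ R) →
      xs.foldl (fun (ex : List String × List String) c =>
          if R.contains c || ex.1.contains c || ex.2.contains c then ex
          else if S c then (ex.1 ++ [c], ex.2)
          else if Dt c then (ex.1, ex.2 ++ [c]) else ex) (E1, E2)
        = (xs.foldl (fun acc c =>
              if (S c && !R.contains c) && !acc.contains c then acc ++ [c] else acc) E1,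
           xs.foldl (fun acc c =>
              if ((!S c && Dt c) && !R.contains c) && !acc.contains c then acc ++ [c] else acc) E2) := by
  intro xs
  induction xs with
  | nil => intro E1 E2 _ _; rfl
  | cons c cs ih =>
    intro E1 E2 h1 h2
    simp only [List.foldl_cons]
    by_cases hR : c ∈ R
    · have e0 : (R.contains c || E1.contains c || E2.contains c) = true := by
        simp [List.contains_eq_mem, hR]
      have e1 : ((S c && !R.contains c) && !E1.contains c) = false := by
        simp [List.contains_eq_mem, hR]
      have e2 : ((!S c && Dt c && !R.contains c) && !E2.contains c) = false := by
        simp [List.contains_eq_mem, hR]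
      rw [e0]
      simp only [if_true, e1, e2, Bool.false_eq_true, if_false]
      exact ih E1 E2 h1 h2
    · by_cases hE1 : c ∈ E1
      · have e0 : (R.contains c || E1.contains c || E2.contains c) = true := by
          simp [List.contains_eq_mem, hE1]
        have e1 : ((S c && !R.contains c) && !E1.contains c) = false := by
          simp [List.contains_eq_mem, hE1]
        have e2 : ((!S c && Dt c && !R.contains c) && !E2.contains c) = false := by
          simp [List.contains_eq_mem, (h1 c hE1).1]
        rw [e0]
        simp only [if_true, e1, e2, Bool.false_eq_true, if_false]
        exact ih E1 E2 h1 h2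
      · by_cases hE2 : c ∈ E2
        · have e0 : (R.contains c || E1.contains c || E2.contains c) = true := by
            simp [List.contains_eq_mem, hE2]
          have e1 : ((S c && !R.contains c) && !E1.contains c) = false := by
            simp [List.contains_eq_mem, (h2 c hE2).1]
          have e2 : ((!S c && Dt c && !R.contains c) && !E2.contains c) = false := by
            simp [List.contains_eq_mem, hE2]
          rw [e0]
          simp only [if_true, e1, e2, Bool.false_eq_true, if_false]
          exact ih E1 E2 h1 h2
        · have e0 : (R.contains c || E1.contains c || E2.contains c) = false := by
            simp [List.contains_eq_mem, hR, hE1, hE2]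
          rw [e0]
          simp only [Bool.false_eq_true, if_false]
          by_cases hS : S c
          · have e1 : ((S c && !R.contains c) && !E1.contains c) = true := by
              simp [List.contains_eq_mem, hS, hR, hE1]
            have e2 : ((!S c && Dt c && !R.contains c) && !E2.contains c) = false := by
              simp [hS]
            rw [if_pos hS, e1, e2]
            simp only [if_true, Bool.false_eq_true, if_false]
            apply ih
            · intro d hd
              rcases List.mem_append.mp hd with hd | hd
              · exact h1 d hd
              · rcases List.mem_singleton.mp hd with rfl
                exact ⟨hS, hR⟩
            · exact h2
          · have e1 : ((S c && !R.contains c) && !E1.contains c) = false := by simp [hS]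
            rw [if_neg hS, e1]
            simp only [Bool.false_eq_true, if_false]
            by_cases hD : Dt c
            · have e2 : ((!S c && Dt c && !R.contains c) && !E2.contains c) = true := by
                simp [List.contains_eq_mem, hS, hD, hR, hE2]
              rw [if_pos hD, e2]
              simp only [if_true]
              apply ih
              · exact h1
              · intro d hd
                rcases List.mem_append.mp hd with hd | hd
                · exact h2 d hd
                · rcases List.mem_singleton.mp hd with rfl
                  exact ⟨by simp [hS], hR⟩
            · have e2 : ((!S c && Dt c && !R.contains c) && !E2.contains c) = false := by
                simp [hD]
              rw [if_neg hD, e2]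
              simp only [Bool.false_eq_true, if_false]
              exact ih E1 E2 h1 h2

-- the two safety-net passes of A equal B's single combined pass
lemma extras_eq (R xs : List String) :
    xs.foldl (fun acc col =>
        if PySem.Str.isIn "date" (PySem.Str.lower col) && !acc.contains col
        then acc ++ [col] else acc)
      (xs.foldl (fun acc col =>
        if PySem.Str.isIn "status" (PySem.Str.lower col) && !acc.contains col
        then acc ++ [col] else acc) R)
    = R ++ (xs.foldl (fun (ex : List String × List String) c =>
          if R.contains c || ex.1.contains c || ex.2.contains c then ex
          else if PySem.Str.isIn "status" (PySem.Str.lower c) then (ex.1 ++ [c], ex.2)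
          else if PySem.Str.isIn "date" (PySem.Str.lower c) then (ex.1, ex.2 ++ [c])
          else ex) ([], [])).1
      ++ (xs.foldl (fun (ex : List String × List String) c =>
          if R.contains c || ex.1.contains c || ex.2.contains c then ex
          else if PySem.Str.isIn "status" (PySem.Str.lower c) then (ex.1 ++ [c], ex.2)
          else if PySem.Str.isIn "date" (PySem.Str.lower c) then (ex.1, ex.2 ++ [c])
          else ex) ([], [])).2 := by
  rw [pair_fold_eq (fun c => PySem.Str.isIn "status" (PySem.Str.lower c))
      (fun c => PySem.Str.isIn "date" (PySem.Str.lower c)) R xs [] []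
      (by intro c h; cases h) (by intro c h; cases h)]
  rw [fold_if_append (fun col => PySem.Str.isIn "status" (PySem.Str.lower col)) xs R]
  rw [fold_if_append (fun col => PySem.Str.isIn "date" (PySem.Str.lower col)) xs
      (R ++ (dd xs).filter (fun c => PySem.Str.isIn "status" (PySem.Str.lower c) && !R.contains c))]
  rw [fold_if_append (fun c => PySem.Str.isIn "status" (PySem.Str.lower c) && !R.contains c) xs []]
  rw [fold_if_append (fun c => (!PySem.Str.isIn "status" (PySem.Str.lower c) &&
        PySem.Str.isIn "date" (PySem.Str.lower c)) && !R.contains c) xs []]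
  simp only [List.nil_append, List.contains_eq_mem, List.not_mem_nil, decide_false,
    Bool.not_false, Bool.and_true, List.append_assoc]
  congr 1
  congr 1
  apply List.filter_congr
  intro c hc
  by_cases hR : c ∈ R <;>
    by_cases hS : PySem.Chars.isIn ['s','t','a','t','u','s'] (PySem.Chars.lower c.toList) <;>
      simp [hR, hS, hc, List.mem_filter]

lemma filter_fst_map_pair {β : Type} [BEq β] (f : String → β) (t : β) (l : List String) :
    ((l.map (fun c => (f c, c))).filter (fun rc => rc.1 == t)).map (fun rc => rc.2)
      = l.filter (fun c => f c == t) := by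
  induction l with
  | nil => rfl
  | cons x l ih => by_cases h : f x == t <;> simp [List.filter_cons, h, ih]

-- B's rank-class emission, rewritten as the classes of psFull
lemma b_required_eq (ql : String) (xs : List String) :
    (PySem.List.pyRange 0 ((List.length bRules : Int) + 1) 1).flatMap
      (fun target => (((PySem.List.dedup xs).map
          (fun c => (bRank (((PySem.List.enumerate bRules).filter
              (fun it => it.2.1.any (fun w => PySem.Str.isIn w ql))).map
              (fun it => (it.1 + 1, it.2.2))) c, c))).filter
          (fun rc => rc.1 == some target)).map (fun rc => rc.2))
      = (List.range (psFull ql).length).flatMap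
          (fun i => (dd xs).filter (fun c => (psFull ql).findIdx? (fun p => p c) == some i)) := by
  have hlen : (psFull ql).length = 7 := by simp [psFull, bRules]
  have hrange : PySem.List.pyRange 0 ((List.length bRules : Int) + 1) 1
      = (List.range 7).map (fun k => Int.ofNat k) := by decide
  rw [hlen, hrange, List.flatMap_map, dedup_eq_dd]
  apply List.flatMap_congr
  intro i _
  rw [filter_fst_map_pair]
  apply List.filter_congr
  intro c _
  show (bRank _ c == some (i : Int)) = _
  rw [bRank_eq ql c]
  cases h : (psFull ql).findIdx? (fun p => p c) <;> simp

-- ===== VERDICT (by name: the statement is the Claim_ definition above) =====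
theorem identify_required_columns_spec : Claim_equal_identify_required_columns := by
  intro query schema_info _ _
  unfold Spec_identify_required_columns identify_required_columns identify_required_columns_alt
  cases hcols : (PySem.Dict.mk schema_info).get? "columns" with
  | none => rfl
  | some xs =>
    simp only [segA]
    simp only [List.append_assoc]
    rw [dedup_eq_dd, seedNorm]
    have hflat : ((psFull (PySem.Str.lower query)).map (fun p => xs.filter p)).flatten
        = xs.filter (fun c => c == "Item Name") ++
          (xs.filter (fun c =>
            aAnyWord (PySem.Str.lower query) ["revenue", "money", "amount", "value", "collected", "billed", "price", "total"] &&
              ["amount", "value", "price", "revenue", "collected", "billed", "deal value"].any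
                (fun kw => PySem.Str.isIn kw (PySem.Str.lower c))) ++
          (xs.filter (fun c =>
            aAnyWord (PySem.Str.lower query) ["sector", "category", "industry", "service"] &&
              ["sector", "service", "category", "industry"].any
                (fun kw => PySem.Str.isIn kw (PySem.Str.lower c))) ++
          (xs.filter (fun c =>
            aAnyWord (PySem.Str.lower query) ["status", "stage", "open", "closed", "won", "lost", "deal", "pipeline", "how many"] &&
              ["status", "stage", "state", "deal status"].any
                (fun kw => PySem.Str.isIn kw (PySem.Str.lower c))) ++
          (xs.filter (fun c =>
            aAnyWord (PySem.Str.lower query) ["date", "when", "time", "quarter", "month", "year", "period"] &&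
              ["date", "time", "created", "updated", "close"].any
                (fun kw => PySem.Str.isIn kw (PySem.Str.lower c))) ++
          (xs.filter (fun c =>
            aAnyWord (PySem.Str.lower query) ["quantity", "count", "number", "how many"] &&
              ["quantity", "count", "number", "qty"].any
                (fun kw => PySem.Str.isIn kw (PySem.Str.lower c))) ++
          (xs.filter (fun c =>
            aAnyWord (PySem.Str.lower query) ["owner", "client", "who", "person"] &&
              ["owner", "client", "person", "code"].any
                (fun kw => PySem.Str.isIn kw (PySem.Str.lower c))))))))) := by
      simp [psFull, bRules]
    rw [← hflat, dd_flatten_classes, b_required_eq (PySem.Str.lower query) xs]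
    generalize (List.range (psFull (PySem.Str.lower query)).length).flatMap
        (fun i => (dd xs).filter
          (fun c => (psFull (PySem.Str.lower query)).findIdx? (fun p => p c) == some i)) = R
    split_ifs
    · rfl
    · rw [← List.append_assoc]; exact extras_eq R xs
    · rfl
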